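-- pv_equiv track=rewrite | github.com/Hung9901/FuckRONRONUP | app/core/sequence_detector.py | detect_attack_sequence
-- ===== SOURCE A (Python) =====
-- FULL_CHAIN_PATTERN: list[str] = [
--     "phishing_click",
--     "permission_request",
--     "accessibility_enabled",
--     "background_activity",
--     "data_transfer",
-- ]
--
-- def detect_attack_sequence(events: list[dict]) -> bool:
--     """
--     Return True if every step of FULL_CHAIN_PATTERN appears **in order**
--     in the session event log.
--
--     This is an O(n) scan: we advance through the pattern list as each
--     required step is found, ensuring ordering is respected.
--     """
--     pattern = FULL_CHAIN_PATTERN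
--     step = 0
--     for event in events:
--         if step >= len(pattern):
--             break
--         if event.get("type") == pattern[step]:
--             step += 1
--     return step == len(pattern)
-- ===== SOURCE B (Python) =====
-- FULL_CHAIN_PATTERN: list[str] = [
--     "phishing_click",
--     "permission_request",
--     "accessibility_enabled",
--     "background_activity",
--     "data_transfer",
-- ]
--
-- def detect_attack_sequence(events: list[dict]) -> bool:
--     # Stage 1: index every event position by its type (one pass).
--     occ: dict = {}
--     for i, e in enumerate(events):
--         occ.setdefault(e.get("type"), []).append(i)
--     # Stage 2: walk the fixed pattern, each step taking the earliest
--     # recorded position strictly after the previous step's position.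
--     prev = -1
--     for step in FULL_CHAIN_PATTERN:
--         for i in occ.get(step, []):
--             if i > prev:
--                 prev = i
--                 break
--         else:
--             return False
--     return True
-- ===== Notes on version B (the rewrite author's own statement) =====
-- stated objective: alternative
-- what changed: A does a single scan over events advancing an integer step counter into the pattern; B first builds a dictionary indexing each event type to its ascending list of positions, then walks the fixed pattern picking from the index the earliest position strictly after the previous step's position.
import Mathlib
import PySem

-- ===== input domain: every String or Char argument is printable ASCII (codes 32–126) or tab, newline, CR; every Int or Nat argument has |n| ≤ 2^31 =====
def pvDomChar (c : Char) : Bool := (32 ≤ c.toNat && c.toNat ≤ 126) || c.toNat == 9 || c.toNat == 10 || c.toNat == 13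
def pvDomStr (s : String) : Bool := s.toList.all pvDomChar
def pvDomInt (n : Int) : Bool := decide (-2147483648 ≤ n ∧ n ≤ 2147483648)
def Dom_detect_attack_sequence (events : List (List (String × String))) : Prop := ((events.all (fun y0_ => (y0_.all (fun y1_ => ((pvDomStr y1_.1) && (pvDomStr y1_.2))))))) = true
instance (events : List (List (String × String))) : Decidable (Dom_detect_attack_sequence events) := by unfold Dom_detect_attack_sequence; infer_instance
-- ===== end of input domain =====

-- B replaces A's single scan with a step counter by a two-stage algorithm: one pass
-- builds a positions index (type -> ascending event indices), then a walk over the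
-- fixed pattern picks the earliest recorded position after the previous one
-- (objective: alternative; same O(n) cost, different data structure).

-- module constant FULL_CHAIN_PATTERN, shared by both programs
def FULL_CHAIN_PATTERN : List String :=
  ["phishing_click", "permission_request", "accessibility_enabled",
   "background_activity", "data_transfer"]

-- event.get("type"), used by both programs
def pvType (e : List (String × String)) : Option String :=
  PySem.Dict.get? (PySem.Dict.mk e) "type"

-- ===== PORT A =====
-- step-counter fold over the events; the Python 'break' leaves the counter unchanged
def detect_attack_sequence (events : List (List (String × String))) : Bool :=
  let pattern := FULL_CHAIN_PATTERN
  let step := events.foldl (fun step event =>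
    if step ≥ pattern.length then step
    else if pvType event == pattern[step]? then step + 1
    else step) 0
  decide (step = pattern.length)

-- ===== PORT B =====
-- inner 'for i in occ.get(step, []): if i > prev: … break / else: return False'
def pvFindAfter (prev : Int) : List Int → Option Int
  | [] => none
  | i :: is => if prev < i then some i else pvFindAfter prev is

-- the 'for step in FULL_CHAIN_PATTERN' walk, state = prev
def pvChain (occ : PySem.Dict (Option String) (List Int)) (prev : Int) : List String → Bool
  | [] => true
  | p :: ps =>
      match pvFindAfter prev (occ.getD (some p) []) with
      | none => false
      | some i => pvChain occ i ps

def detect_attack_sequence_alt (events : List (List (String × String))) : Bool :=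
  -- stage 1: occ = {} ; for i, e in enumerate(events): occ.setdefault(e.get("type"), []).append(i)
  let occ := (events.foldl
    (fun (s : Int × PySem.Dict (Option String) (List Int)) e =>
      let t := pvType e
      (s.1 + 1, s.2.insert t (s.2.getD t [] ++ [s.1])))
    ((0 : Int), PySem.Dict.empty)).2
  -- stage 2: prev = -1 ; chain through the pattern
  pvChain occ (-1) FULL_CHAIN_PATTERN

-- ===== PRECONDITION & SPEC =====
def Spec_detect_attack_sequence (events : List (List (String × String))) (out : Bool) : Prop := out = detect_attack_sequence_alt events
instance (events : List (List (String × String))) (out : Bool) : Decidable (Spec_detect_attack_sequence events out) := by unfold Spec_detect_attack_sequence; infer_instance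

-- ===== CLAIM (what is proved, stated in full; the proofs are below) =====
def Claim_equal_detect_attack_sequence : Prop := ∀ (events : List (List (String × String))), Dom_detect_attack_sequence events → Spec_detect_attack_sequence events (detect_attack_sequence events)

-- ===== LEMMAS AND PROOFS =====

-- proof-only intermediate: consume events until the first one whose type is `target`
def pvConsume (target : String) : List (List (String × String)) → Option (List (List (String × String)))
  | [] => none
  | e :: rest =>
      if pvType e == some target then some rest
      else pvConsume target rest

-- proof-only: the ascending list of positions (offset n) whose type is k
def pvOccFrom (k : Option String) : Nat → List (List (String × String)) → List Int
  | _, [] => []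
  | n, e :: l => if pvType e == k then (n : Int) :: pvOccFrom k (n+1) l else pvOccFrom k (n+1) l

-- once the counter has reached the pattern length it never moves
lemma stepA_stays (events : List (List (String × String))) (step : Nat)
    (h : FULL_CHAIN_PATTERN.length ≤ step) :
    events.foldl (fun step event =>
      if step ≥ FULL_CHAIN_PATTERN.length then step
      else if pvType event == FULL_CHAIN_PATTERN[step]? then step + 1
      else step) step = step := by
  induction events with
  | nil => rfl
  | cons e rest ih => simpa [h] using ih

-- A's counter fold equals the consume-chain over the remaining pattern
lemma key (events : List (List (String × String))) (step : Nat) (hstep : step ≤ FULL_CHAIN_PATTERN.length) :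
    (decide (events.foldl (fun step event =>
        if step ≥ FULL_CHAIN_PATTERN.length then step
        else if pvType event == FULL_CHAIN_PATTERN[step]? then step + 1
        else step) step = FULL_CHAIN_PATTERN.length))
    = ((FULL_CHAIN_PATTERN.drop step).foldlM (fun evs t => pvConsume t evs) events).isSome := by
  induction events generalizing step with
  | nil =>
    rcases Nat.lt_or_ge step FULL_CHAIN_PATTERN.length with h | h
    · have hne : step ≠ FULL_CHAIN_PATTERN.length := Nat.ne_of_lt h
      obtain ⟨p, tail, hdrop⟩ : ∃ p tail, FULL_CHAIN_PATTERN.drop step = p :: tail := by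
        cases hd : FULL_CHAIN_PATTERN.drop step with
        | nil => exact absurd (List.drop_eq_nil_iff.mp hd) (Nat.not_le_of_lt h)
        | cons p tail => exact ⟨p, tail, rfl⟩
      simp [hdrop, pvConsume, hne]
    · have heq : step = FULL_CHAIN_PATTERN.length := Nat.le_antisymm hstep h
      simp [heq]
  | cons e rest ih =>
    rcases Nat.lt_or_ge step FULL_CHAIN_PATTERN.length with h | h
    · have hnotge : ¬ step ≥ FULL_CHAIN_PATTERN.length := Nat.not_le_of_lt h
      have hget : FULL_CHAIN_PATTERN[step]? = some (FULL_CHAIN_PATTERN[step]'h) :=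
        List.getElem?_eq_getElem h
      have hdrop : FULL_CHAIN_PATTERN.drop step
          = FULL_CHAIN_PATTERN[step]'h :: FULL_CHAIN_PATTERN.drop (step + 1) :=
        List.drop_eq_getElem_cons h
      rw [hdrop, List.foldlM_cons]
      by_cases hm : pvType e = some (FULL_CHAIN_PATTERN[step]'h)
      · have hred : pvConsume (FULL_CHAIN_PATTERN[step]'h) (e :: rest) = some rest := by
          simp [pvConsume, hm]
        rw [List.foldl_cons, if_neg hnotge, if_pos (by simp [hm, hget]), hred]
        simpa using ih (step + 1) h
      · have hred : pvConsume (FULL_CHAIN_PATTERN[step]'h) (e :: rest)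
            = pvConsume (FULL_CHAIN_PATTERN[step]'h) rest := by
          simp only [pvConsume, ite_eq_right_iff]
          intro hc
          exact absurd (by simpa using hc) hm
        rw [List.foldl_cons, if_neg hnotge, if_neg (by rw [hget]; simpa using hm), hred]
        have := ih step hstep
        rw [hdrop, List.foldlM_cons] at this
        exact this
    · have heq : step = FULL_CHAIN_PATTERN.length := Nat.le_antisymm hstep h
      rw [stepA_stays (e :: rest) step h]
      simp [heq]

-- the dict built by B's first pass holds, at key k, exactly pvOccFrom
lemma build_getD (k : Option String) :
    ∀ (l : List (List (String × String))) (n : Nat) (d : PySem.Dict (Option String) (List Int)),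
    ((l.foldl (fun (s : Int × PySem.Dict (Option String) (List Int)) e =>
        let t := pvType e
        (s.1 + 1, s.2.insert t (s.2.getD t [] ++ [s.1]))) ((n : Int), d)).2).getD k []
      = d.getD k [] ++ pvOccFrom k n l := by
  intro l
  induction l with
  | nil => intro n d; simp [pvOccFrom]
  | cons e l ih =>
    intro n d
    have hcast : ((n : Int) + 1) = ((n + 1 : Nat) : Int) := by push_cast; ring
    rw [List.foldl_cons]
    simp only
    rw [hcast, ih (n+1)]
    rw [PySem.Dict.getD_insert]
    by_cases hk : k = pvType e
    · simp [pvOccFrom, hk, List.append_assoc]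
    · have hne : ¬ (pvType e == k) = true := fun h => hk ((beq_iff_eq.mp h).symm)
      simp [pvOccFrom, hk, hne]

-- every recorded position is ≥ the offset
lemma occFrom_ge (k : Option String) :
    ∀ (l : List (List (String × String))) (n : Nat) (i : Int),
    i ∈ pvOccFrom k n l → (n : Int) ≤ i := by
  intro l
  induction l with
  | nil => intro n i h; simp [pvOccFrom] at h
  | cons e l ih =>
    intro n i h
    by_cases hm : (pvType e == k) = true
    · rw [pvOccFrom, if_pos hm] at h
      rcases List.mem_cons.mp h with rfl | h
      · exact le_refl _
      · exact le_trans (by push_cast; omega) (ih (n+1) i h)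
    · rw [pvOccFrom, if_neg hm] at h
      exact le_trans (by push_cast; omega) (ih (n+1) i h)

-- searching the full position list after n-1 = reading the head of the suffix list
lemma occ_split (k : Option String) :
    ∀ (l : List (List (String × String))) (m n : Nat), m ≤ n →
    pvFindAfter ((n : Int) - 1) (pvOccFrom k m l)
      = (pvOccFrom k n (l.drop (n - m))).head? := by
  intro l
  induction l with
  | nil => intro m n _; simp [pvOccFrom, pvFindAfter]
  | cons e l ih =>
    intro m n hmn
    rcases Nat.eq_or_lt_of_le hmn with rfl | hlt
    · -- m = n : every element of pvOccFrom k m (e :: l) is ≥ m > m - 1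
      rw [Nat.sub_self, List.drop_zero]
      cases hocc : pvOccFrom k m (e :: l) with
      | nil => simp [pvFindAfter]
      | cons i is =>
        have hi : (m : Int) ≤ i := occFrom_ge k (e :: l) m i (by rw [hocc]; exact List.mem_cons_self)
        simp [pvFindAfter, show (m : Int) - 1 < i by omega]
    · -- m < n : the head element (if any) is m ≤ n - 1, skipped by pvFindAfter
      have hdrop : (e :: l).drop (n - m) = l.drop (n - (m + 1)) := by
        have h1 : n - m = (n - (m + 1)) + 1 := by omega
        rw [h1, List.drop_succ_cons]
      by_cases hm : (pvType e == k) = true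
      · rw [pvOccFrom, if_pos hm, pvFindAfter,
            if_neg (by omega), ih (m+1) n hlt, hdrop]
      · rw [pvOccFrom, if_neg hm, ih (m+1) n hlt, hdrop]

-- consume-chain on the suffix from n = B's chain with prev = n - 1
lemma chain_eq (events : List (List (String × String)))
    (occ : PySem.Dict (Option String) (List Int))
    (hocc : ∀ k, occ.getD k [] = pvOccFrom k 0 events) :
    ∀ (ps : List String) (n : Nat),
    ((ps.foldlM (fun evs t => pvConsume t evs) (events.drop n)).isSome)
      = pvChain occ ((n : Int) - 1) ps := by
  intro ps
  induction ps with
  | nil => intro n; simp [pvChain]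
  | cons p ps ihps =>
    intro n
    rw [List.foldlM_cons]
    rw [pvChain, hocc (some p), occ_split (some p) events 0 n (Nat.zero_le n), Nat.sub_zero]
    -- inner induction on the suffix
    have inner : ∀ (rest : List (List (String × String))) (n : Nat),
        events.drop n = rest →
        (match pvConsume p rest with
         | none => false
         | some r => ((ps.foldlM (fun evs t => pvConsume t evs) r).isSome : Bool))
        = (match (pvOccFrom (some p) n rest).head? with
           | none => false
           | some i => pvChain occ i ps) := by
      intro rest
      induction rest with
      | nil => intro n _; simp [pvConsume, pvOccFrom]
      | cons e r ihr =>
        intro n hn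
        have hr : events.drop (n + 1) = r := by
          rw [← List.tail_drop, hn, List.tail_cons]
        by_cases hm : (pvType e == some p) = true
        · have h1 : pvConsume p (e :: r) = some r := by rw [pvConsume, if_pos hm]
          have h2 : pvOccFrom (some p) n (e :: r) = (n : Int) :: pvOccFrom (some p) (n+1) r := by
            rw [pvOccFrom, if_pos hm]
          rw [h1, h2]
          have := ihps (n + 1)
          rw [hr] at this
          simp only [List.head?_cons]
          rw [this]
          norm_num
        · have h1 : pvConsume p (e :: r) = pvConsume p r := by rw [pvConsume, if_neg hm]
          have h2 : pvOccFrom (some p) n (e :: r) = pvOccFrom (some p) (n+1) r := by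
            rw [pvOccFrom, if_neg hm]
          rw [h1, h2]
          exact ihr (n + 1) hr
    have := inner (events.drop n) n rfl
    rw [← this]
    cases pvConsume p (events.drop n) with
    | none => simp
    | some r => simp

-- ===== VERDICT (by name: the statement is the Claim_ definition above) =====
theorem detect_attack_sequence_spec : Claim_equal_detect_attack_sequence := by
  intro events _
  unfold Spec_detect_attack_sequence detect_attack_sequence detect_attack_sequence_alt
  simp only
  have hocc : ∀ k,
      ((events.foldl (fun (s : Int × PySem.Dict (Option String) (List Int)) e =>
          let t := pvType e
          (s.1 + 1, s.2.insert t (s.2.getD t [] ++ [s.1]))) ((0 : Int), PySem.Dict.empty)).2).getD k []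
        = pvOccFrom k 0 events := by
    intro k
    have := build_getD k events 0 PySem.Dict.empty
    simpa using this
  have hchain := chain_eq events _ hocc FULL_CHAIN_PATTERN 0
  rw [List.drop_zero] at hchain
  have hkey := key events 0 (Nat.zero_le _)
  rw [List.drop_zero] at hkey
  rw [hkey, hchain]
  norm_num
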